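-- pv_equiv track=rewrite | github.com/Codehive-Inc/BIMigrator-Cognos | cognos_migrator/generators/staging_table_handler.py | _group_sql_relationships_by_tables
-- ===== SOURCE A (Python) =====
-- from typing import Dict, List, Optional, Any, Set, Tuple
--
-- def _group_sql_relationships_by_tables(sql_relationships: List[Dict[str, Any]]) -> Dict[str, List[Dict[str, Any]]]:
--     """
--     Group SQL relationships by the tables they connect.
--
--     Args:
--         sql_relationships: List of SQL relationships to group
--
--     Returns:
--         Dictionary mapping table pairs to lists of SQL relationships
--     """
--     groups = {}
--
--     for rel in sql_relationships:
--         table_a = rel.get('table_a_one_side', '')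
--         table_b = rel.get('table_b_many_side', '')
--
--         # Create a consistent key for the table pair
--         if table_a < table_b:
--             key = f"{table_a}:{table_b}"
--         else:
--             key = f"{table_b}:{table_a}"
--
--         if key not in groups:
--             groups[key] = []
--
--         groups[key].append(rel)
--
--     return groups
-- ===== SOURCE B (Python) =====
-- def _group_sql_relationships_by_tables(sql_relationships):
--     def key_of(rel):
--         a = rel.get('table_a_one_side', '')
--         b = rel.get('table_b_many_side', '')
--         return f"{a}:{b}" if a < b else f"{b}:{a}"
--     keys = list(dict.fromkeys(key_of(r) for r in sql_relationships))
--     return {k: [r for r in sql_relationships if key_of(r) == k] for k in keys}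
-- ===== Notes on version B (the rewrite author's own statement) =====
-- stated objective: alternative
-- what changed: Instead of one pass probing and mutating a dict of lists, B first computes the deduplicated list of canonical keys and then builds each group by filtering the input once per distinct key.
import Mathlib
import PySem

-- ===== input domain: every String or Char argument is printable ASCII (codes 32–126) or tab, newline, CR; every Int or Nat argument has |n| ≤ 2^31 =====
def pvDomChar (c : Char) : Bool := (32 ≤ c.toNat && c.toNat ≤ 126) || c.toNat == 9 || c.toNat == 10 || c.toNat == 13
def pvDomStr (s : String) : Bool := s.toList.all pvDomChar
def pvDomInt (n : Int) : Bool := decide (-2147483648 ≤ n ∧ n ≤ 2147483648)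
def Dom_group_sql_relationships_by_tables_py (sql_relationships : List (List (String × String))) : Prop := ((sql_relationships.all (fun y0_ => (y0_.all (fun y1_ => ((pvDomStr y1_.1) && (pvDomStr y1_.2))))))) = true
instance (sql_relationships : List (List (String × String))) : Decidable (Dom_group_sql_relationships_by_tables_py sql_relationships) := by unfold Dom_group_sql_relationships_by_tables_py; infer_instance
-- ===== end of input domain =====

-- B replaces A's single dict-probing pass by dedup-of-keys + one filter per distinct key (objective: alternative decomposition, same results).

-- ===== PORT A =====
-- literal transliteration of A's loop: probe the dict, insert an empty group for a new key, append the relationship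
def group_sql_relationships_by_tables_py (sql_relationships : List (List (String × String))) : List (String × List (List (String × String))) :=
  (sql_relationships.foldl (fun groups rel =>
      let table_a := (PySem.Dict.mk rel).getD "table_a_one_side" ""
      let table_b := (PySem.Dict.mk rel).getD "table_b_many_side" ""
      let key := if table_a < table_b then table_a ++ ":" ++ table_b else table_b ++ ":" ++ table_a
      let groups := if groups.contains key then groups else groups.insert key ([] : List (List (String × String)))
      groups.modify key [] (fun g => g ++ [rel]))
    PySem.Dict.empty).items

-- ===== PORT B =====
def pvKeyOf (rel : List (String × String)) : String :=
  let a := (PySem.Dict.mk rel).getD "table_a_one_side" ""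
  let b := (PySem.Dict.mk rel).getD "table_b_many_side" ""
  if a < b then a ++ ":" ++ b else b ++ ":" ++ a

def group_sql_relationships_by_tables_py_alt (sql_relationships : List (List (String × String))) : List (String × List (List (String × String))) :=
  (PySem.List.dedup (sql_relationships.map pvKeyOf)).map
    (fun k => (k, sql_relationships.filter (fun r => pvKeyOf r == k)))

-- ===== PRECONDITION & SPEC =====
def Spec_group_sql_relationships_by_tables_py (sql_relationships : List (List (String × String))) (out : List (String × List (List (String × String)))) : Prop := out = group_sql_relationships_by_tables_py_alt sql_relationships
instance (sql_relationships : List (List (String × String))) (out : List (String × List (List (String × String)))) : Decidable (Spec_group_sql_relationships_by_tables_py sql_relationships out) := by unfold Spec_group_sql_relationships_by_tables_py; infer_instance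

-- ===== CLAIM (what is proved, stated in full; the proofs are below) =====
def Claim_equal_group_sql_relationships_by_tables_py : Prop := ∀ (sql_relationships : List (List (String × String))), Dom_group_sql_relationships_by_tables_py sql_relationships → Spec_group_sql_relationships_by_tables_py sql_relationships (group_sql_relationships_by_tables_py sql_relationships)

-- ===== LEMMAS AND PROOFS =====

-- A's loop body, named for the proofs (definitionally the function folded in port A)
def pvStep (groups : PySem.Dict String (List (List (String × String)))) (rel : List (String × String)) : PySem.Dict String (List (List (String × String))) :=
  let table_a := (PySem.Dict.mk rel).getD "table_a_one_side" ""
  let table_b := (PySem.Dict.mk rel).getD "table_b_many_side" ""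
  let key := if table_a < table_b then table_a ++ ":" ++ table_b else table_b ++ ":" ++ table_a
  let groups := if groups.contains key then groups else groups.insert key ([] : List (List (String × String)))
  groups.modify key [] (fun g => g ++ [rel])

theorem pvStep_eq (d : PySem.Dict String (List (List (String × String)))) (r : List (String × String)) :
    pvStep d r = (if d.contains (pvKeyOf r) then d else d.insert (pvKeyOf r) []).modify (pvKeyOf r) [] (fun g => g ++ [r]) := by
  simp only [pvStep, pvKeyOf]

-- invariant of A's fold: keys are the canonical keys seen so far (dedup'd, in first-seen order),
-- and each key's group is the filter of the processed list
theorem pvA_inv (rels : List (List (String × String))) :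
    (rels.foldl pvStep PySem.Dict.empty).keys = PySem.Set.ofList (rels.map pvKeyOf) ∧
    ∀ k, (rels.foldl pvStep PySem.Dict.empty).getD k [] = rels.filter (fun r => pvKeyOf r == k) := by
  induction rels using List.reverseRecOn with
  | nil => simp [PySem.Dict.keys_empty, PySem.Set.ofList_nil, PySem.Dict.getD_empty]
  | append_singleton l r ih =>
    obtain ⟨hk, hg⟩ := ih
    rw [List.foldl_append, List.foldl_cons, List.foldl_nil, pvStep_eq]
    set d := l.foldl pvStep PySem.Dict.empty with hd
    constructor
    · rw [List.map_append, List.map_cons, List.map_nil, PySem.Set.ofList_append_singleton]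
      by_cases hc : d.contains (pvKeyOf r) = true
      · have hmem : pvKeyOf r ∈ PySem.Set.ofList (l.map pvKeyOf) := by
          rw [← hk]; exact (PySem.Dict.contains_iff_mem_keys d _).1 hc
        rw [if_pos hc, PySem.Dict.keys_modify, PySem.Dict.keys_insert_of_contains _ _ hc,
          hk, PySem.Set.add_of_mem hmem]
      · have hc' : d.contains (pvKeyOf r) = false := by simpa using hc
        have hmem : pvKeyOf r ∉ PySem.Set.ofList (l.map pvKeyOf) := by
          rw [← hk]; intro h
          exact hc ((PySem.Dict.contains_iff_mem_keys d _).2 h)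
        rw [if_neg hc, PySem.Dict.keys_modify, PySem.Dict.keys_insert_of_contains,
          PySem.Dict.keys_insert_of_not_contains _ _ hc', hk, PySem.Set.add_of_not_mem hmem]
        exact PySem.Dict.contains_insert_self _ _ _
    · intro k
      rw [List.filter_append, List.filter_cons, List.filter_nil]
      by_cases hkey : k = pvKeyOf r
      · subst hkey
        simp only [beq_self_eq_true, if_pos]
        by_cases hc : d.contains (pvKeyOf r) = true
        · rw [if_pos hc, PySem.Dict.getD_modify_self, hg]
        · have hc' : d.contains (pvKeyOf r) = false := by simpa using hc
          have hfil : l.filter (fun r' => pvKeyOf r' == pvKeyOf r) = [] := by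
            rw [List.filter_eq_nil_iff]
            intro a ha hb
            have : pvKeyOf r ∈ d.keys := by
              rw [hk, PySem.Set.mem_ofList]
              exact (by simpa using hb) ▸ List.mem_map_of_mem ha
            exact (by simpa [hc'] using (PySem.Dict.contains_iff_mem_keys d (pvKeyOf r)).2 this)
          rw [if_neg hc, PySem.Dict.getD_modify_self, PySem.Dict.getD_insert_self, hfil,
            List.nil_append]
      · have hb : (pvKeyOf r == k) = false := by simpa using fun h => hkey h.symm
        rw [hb]
        simp only [Bool.false_eq_true, if_false, List.append_nil]
        by_cases hc : d.contains (pvKeyOf r) = true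
        · rw [if_pos hc, PySem.Dict.getD_modify_of_ne _ _ _ (fun h => hkey h), hg]
        · rw [if_neg hc, PySem.Dict.getD_modify_of_ne _ _ _ (fun h => hkey h),
            PySem.Dict.getD_insert_of_ne _ _ _ (fun h => hkey h), hg]

-- ===== VERDICT (by name: the statement is the Claim_ definition above) =====
theorem group_sql_relationships_by_tables_py_spec : Claim_equal_group_sql_relationships_by_tables_py := by
  intro rels _
  unfold Spec_group_sql_relationships_by_tables_py group_sql_relationships_by_tables_py group_sql_relationships_by_tables_py_alt
  obtain ⟨hk, hg⟩ := pvA_inv rels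
  have hnd : (rels.foldl pvStep PySem.Dict.empty).keys.Nodup := by
    rw [hk]; exact PySem.Set.nodup_ofList _
  show (rels.foldl pvStep PySem.Dict.empty).items = _
  rw [PySem.Dict.items_eq_map_keys _ hnd ([] : List (List (String × String))), hk]
  simp only [PySem.List.dedup_eq_ofList]
  exact List.map_congr_left (fun k _ => by rw [hg k])
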